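-- pv_equiv track=rewrite | github.com/pulsence/local-second-mind | lsm/query/stages/llm_rerank.py | parse_ranking_response
-- ===== SOURCE A (Python) =====
-- from typing import Any, Dict, List, Set
--
-- def parse_ranking_response(
--     ranking: Any,
--     candidates: List[Dict[str, Any]],
--     k: int,
-- ) -> List[Dict[str, Any]]:
--     """Convert model ranking payload into ordered candidates."""
--     if not isinstance(ranking, list):
--         return candidates[:k]
--
--     chosen: List[Dict[str, Any]] = []
--     seen: Set[int] = set()
--
--     for item in ranking:
--         if not isinstance(item, dict) or "index" not in item:
--             continue
--         try:
--             idx = int(item["index"])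
--         except (TypeError, ValueError):
--             continue
--
--         if 0 <= idx < len(candidates) and idx not in seen:
--             chosen.append(candidates[idx])
--             seen.add(idx)
--         if len(chosen) >= k:
--             break
--
--     if len(chosen) < k:
--         for i, candidate in enumerate(candidates):
--             if i not in seen:
--                 chosen.append(candidate)
--             if len(chosen) >= k:
--                 break
--
--     return chosen
-- ===== SOURCE B (Python) =====
-- from typing import Any, Dict, List
--
--
-- def parse_ranking_response(
--     ranking: Any,
--     candidates: List[Dict[str, Any]],
--     k: int,
-- ) -> List[Dict[str, Any]]:
--     """Convert model ranking payload into ordered candidates."""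
--     if not isinstance(ranking, list):
--         return candidates[:k]
--
--     n = len(candidates)
--
--     # Assign each candidate index a sort priority: ranked indices get the
--     # position of their first valid mention, unranked ones get n-preserving
--     # keys past every ranked priority.  Sorting range(n) by that key yields
--     # the full ordering; one slice of it gives the answer.
--     prio: Dict[int, int] = {}
--     for pos, item in enumerate(ranking):
--         if not isinstance(item, dict) or "index" not in item:
--             continue
--         try:
--             idx = int(item["index"])
--         except (TypeError, ValueError):
--             continue
--         if 0 <= idx < n and idx not in prio:
--             prio[idx] = pos
--
--     order = sorted(range(n), key=lambda i: prio.get(i, len(ranking) + i))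
--     return [candidates[i] for i in order[:max(k, 0)]]
-- ===== Notes on version B (the rewrite author's own statement) =====
-- stated objective: alternative
-- what changed: B replaces A's two accumulate-with-early-break loops by a different mechanism: one pass builds a priority dict mapping each valid candidate index to the position of its first mention in the ranking, then sorted(range(n), key=lambda i: prio.get(i, len(ranking)+i)) produces the complete ordering and one slice of the mapped candidates is returned.
-- intended difference: When k <= 0 and the first ranking item carrying an 'index' key has an in-range index, A returns that one candidate (it appends before its break check fires) although at most k<=0 candidates were requested; B returns the intended empty list. — e.g. on parse_ranking_response([[("index", 0)]], [[("text", "a")]], 0): A returns [[("text", "a")]], B returns []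
import Mathlib
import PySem

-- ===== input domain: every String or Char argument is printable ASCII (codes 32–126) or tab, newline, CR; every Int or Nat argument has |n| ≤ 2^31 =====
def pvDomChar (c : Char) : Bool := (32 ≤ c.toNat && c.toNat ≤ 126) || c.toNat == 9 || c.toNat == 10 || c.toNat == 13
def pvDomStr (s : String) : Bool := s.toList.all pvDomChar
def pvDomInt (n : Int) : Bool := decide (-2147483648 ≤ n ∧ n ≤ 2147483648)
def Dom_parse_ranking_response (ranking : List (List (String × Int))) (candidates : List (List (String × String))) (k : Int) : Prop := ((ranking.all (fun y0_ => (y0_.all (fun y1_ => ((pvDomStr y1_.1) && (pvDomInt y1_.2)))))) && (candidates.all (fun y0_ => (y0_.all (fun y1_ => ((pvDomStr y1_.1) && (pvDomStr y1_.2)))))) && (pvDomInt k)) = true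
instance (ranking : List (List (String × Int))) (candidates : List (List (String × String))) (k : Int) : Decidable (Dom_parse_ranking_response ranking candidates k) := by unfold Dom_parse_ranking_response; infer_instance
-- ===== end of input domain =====

-- B replaces A's two accumulate-with-early-break loops by a priority assignment (first valid
-- ranking position per index) followed by one sort of range(n) by that priority and one slice;
-- B intentionally returns [] for k ≤ 0 (see D_).

-- ===== PORT A =====
-- '"index" in item' / 'item["index"]' (first match; int() on an int never raises on the typed domain)
def prrIndex? (item : List (String × Int)) : Option Int :=
  (PySem.Dict.mk item).get? "index"

-- first loop of A: break as soon as len(chosen) >= k (checked after every convertible item)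
def prrA_loop1 (candidates : List (List (String × String))) (k : Int) :
    List (List (String × Int)) → List (List (String × String)) → PySem.Set Int →
    List (List (String × String)) × PySem.Set Int
  | [], chosen, seen => (chosen, seen)
  | item :: rest, chosen, seen =>
    match prrIndex? item with
    | none => prrA_loop1 candidates k rest chosen seen
    | some idx =>
      let st :=
        if 0 ≤ idx ∧ idx < (candidates.length : Int) ∧ idx ∉ seen then
          -- candidates[idx]: in range by the guard, so pyGetD is exact here
          (chosen ++ [PySem.List.pyGetD candidates idx []], PySem.Set.add seen idx)
        else (chosen, seen)
      if k ≤ (st.1.length : Int) then st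
      else prrA_loop1 candidates k rest st.1 st.2

-- second loop of A: fill from enumerate(candidates), same break
def prrA_loop2 (k : Int) :
    List (Int × List (String × String)) → List (List (String × String)) → PySem.Set Int →
    List (List (String × String))
  | [], chosen, _ => chosen
  | (i, cand) :: rest, chosen, seen =>
    let chosen' := if i ∈ seen then chosen else chosen ++ [cand]
    if k ≤ (chosen'.length : Int) then chosen'
    else prrA_loop2 k rest chosen' seen

def parse_ranking_response (ranking : List (List (String × Int))) (candidates : List (List (String × String))) (k : Int) : List (List (String × String)) :=
  -- 'if not isinstance(ranking, list)' is always false on the typed domain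
  let st := prrA_loop1 candidates k ranking [] PySem.Set.empty
  if (st.1.length : Int) < k then prrA_loop2 k (PySem.List.enumerate candidates 0) st.1 st.2
  else st.1

-- ===== PORT B =====
-- B's loop over enumerate(ranking): prio[idx] = position of the first valid mention of idx
def prrB_prio (n : Int) :
    List (Int × List (String × Int)) → PySem.Dict Int Int → PySem.Dict Int Int
  | [], prio => prio
  | (pos, item) :: rest, prio =>
    match prrIndex? item with
    | none => prrB_prio n rest prio
    | some idx =>
      if 0 ≤ idx ∧ idx < n ∧ prio.contains idx = false then
        prrB_prio n rest (prio.insert idx pos)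
      else prrB_prio n rest prio

def parse_ranking_response_alt (ranking : List (List (String × Int))) (candidates : List (List (String × String))) (k : Int) : List (List (String × String)) :=
  let prio := prrB_prio (candidates.length : Int) (PySem.List.enumerate ranking 0) PySem.Dict.empty
  -- sorted(range(n), key = lambda i: prio.get(i, len(ranking) + i))
  let order := PySem.List.sorted (PySem.List.pyRange 0 candidates.length 1)
      (fun i => prio.getD i ((ranking.length : Int) + i))
  (PySem.List.slice order none (some (max k 0))).map (fun i => PySem.List.pyGetD candidates i [])

-- ===== PRECONDITION & SPEC =====
-- When k ≤ 0 and the first ranking item carrying an "index" key has an in-range index, A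
-- returns that one candidate (it appends before its break check fires) although at most
-- k ≤ 0 candidates were requested; B returns the intended empty list.
def D_parse_ranking_response (ranking : List (List (String × Int))) (candidates : List (List (String × String))) (k : Int) : Prop :=
  k ≤ 0 ∧
  (match ranking.findSome? (fun item => (PySem.Dict.mk item).get? "index") with
   | some idx => decide (0 ≤ idx ∧ idx < (candidates.length : Int))
   | none => false) = true
instance (ranking : List (List (String × Int))) (candidates : List (List (String × String))) (k : Int) : Decidable (D_parse_ranking_response ranking candidates k) := by unfold D_parse_ranking_response; infer_instance

def Spec_parse_ranking_response (ranking : List (List (String × Int))) (candidates : List (List (String × String))) (k : Int) (out : List (List (String × String))) : Prop := ¬ D_parse_ranking_response ranking candidates k → out = parse_ranking_response_alt ranking candidates k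
instance (ranking : List (List (String × Int))) (candidates : List (List (String × String))) (k : Int) (out : List (List (String × String))) : Decidable (Spec_parse_ranking_response ranking candidates k out) := by unfold Spec_parse_ranking_response; infer_instance

def pvDiffWitness_parse_ranking_response : (List (List (String × Int))) × (List (List (String × String))) × Int :=
  ([[("index", 0)]], [[("text", "a")]], 0)
def pvDiffWitnessOut_parse_ranking_response : (List (List (String × String))) × (List (List (String × String))) :=
  ([[("text", "a")]], [])

-- ===== CLAIM (what is proved, stated in full; the proofs are below) =====
def Claim_unchanged_parse_ranking_response : Prop := ∀ (ranking : List (List (String × Int))) (candidates : List (List (String × String))) (k : Int), Dom_parse_ranking_response ranking candidates k → Spec_parse_ranking_response ranking candidates k (parse_ranking_response ranking candidates k)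
def Claim_changed_parse_ranking_response : Prop := Dom_parse_ranking_response (pvDiffWitness_parse_ranking_response.1) (pvDiffWitness_parse_ranking_response.2.1) (pvDiffWitness_parse_ranking_response.2.2) ∧ D_parse_ranking_response (pvDiffWitness_parse_ranking_response.1) (pvDiffWitness_parse_ranking_response.2.1) (pvDiffWitness_parse_ranking_response.2.2) ∧ parse_ranking_response (pvDiffWitness_parse_ranking_response.1) (pvDiffWitness_parse_ranking_response.2.1) (pvDiffWitness_parse_ranking_response.2.2) = pvDiffWitnessOut_parse_ranking_response.1 ∧ parse_ranking_response_alt (pvDiffWitness_parse_ranking_response.1) (pvDiffWitness_parse_ranking_response.2.1) (pvDiffWitness_parse_ranking_response.2.2) = pvDiffWitnessOut_parse_ranking_response.2 ∧ pvDiffWitnessOut_parse_ranking_response.1 ≠ pvDiffWitnessOut_parse_ranking_response.2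
def Claim_exact_parse_ranking_response : Prop := ∀ (ranking : List (List (String × Int))) (candidates : List (List (String × String))) (k : Int), Dom_parse_ranking_response ranking candidates k → D_parse_ranking_response ranking candidates k → parse_ranking_response ranking candidates k ≠ parse_ranking_response_alt ranking candidates k

-- ===== LEMMAS AND PROOFS =====

-- the full validated-order index list both programs are about
def prrOrder (candidates : List (List (String × String))) :
    List (List (String × Int)) → PySem.Set Int → List Int
  | [], _ => []
  | item :: rest, seen =>
    match prrIndex? item with
    | none => prrOrder candidates rest seen
    | some idx =>
      if 0 ≤ idx ∧ idx < (candidates.length : Int) ∧ idx ∉ seen then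
        idx :: prrOrder candidates rest (PySem.Set.add seen idx)
      else prrOrder candidates rest seen

-- the (index, first-position) pairs B's dict holds, in insertion order
def prrOrderPos (n : Int) : List (Int × List (String × Int)) → List Int → List (Int × Int)
  | [], _ => []
  | (pos, item) :: rest, seen =>
    match prrIndex? item with
    | none => prrOrderPos n rest seen
    | some idx =>
      if 0 ≤ idx ∧ idx < n ∧ idx ∉ seen then (idx, pos) :: prrOrderPos n rest (seen ++ [idx])
      else prrOrderPos n rest seen

theorem prrB_prio_items (n : Int) :
    ∀ (pairs : List (Int × List (String × Int))) (prio : PySem.Dict Int Int),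
      (prrB_prio n pairs prio).items = prio.items ++ prrOrderPos n pairs prio.keys := by
  intro pairs
  induction pairs with
  | nil => intro prio; simp [prrB_prio, prrOrderPos]
  | cons p rest ih =>
    intro prio
    obtain ⟨pos, item⟩ := p
    simp only [prrB_prio, prrOrderPos]
    cases h : prrIndex? item with
    | none => exact ih prio
    | some idx =>
      dsimp only
      by_cases hmem : idx ∈ prio.keys
      · have hc : prio.contains idx = true := (PySem.Dict.contains_iff_mem_keys prio idx).2 hmem
        rw [if_neg (by simp [hc]), if_neg (by tauto)]
        exact ih prio
      · have hc : prio.contains idx = false := by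
          cases hcc : prio.contains idx with
          | false => rfl
          | true => exact absurd ((PySem.Dict.contains_iff_mem_keys prio idx).1 hcc) hmem
        by_cases hok : 0 ≤ idx ∧ idx < n
        · rw [if_pos ⟨hok.1, hok.2, hc⟩, if_pos ⟨hok.1, hok.2, hmem⟩]
          rw [ih (prio.insert idx pos)]
          rw [PySem.Dict.items_insert_of_not_contains prio pos hc,
              PySem.Dict.keys_insert_of_not_contains prio pos hc]
          simp
        · rw [if_neg (by tauto), if_neg (by tauto)]
          exact ih prio

theorem set_add_of_not_mem {seen : PySem.Set Int} {idx : Int} (h : idx ∉ seen) :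
    PySem.Set.add seen idx = seen ++ [idx] := by
  simp [PySem.Set.add, PySem.Set.contains, h]

theorem prrOrderPos_fst (cs : List (List (String × String))) :
    ∀ (ranking : List (List (String × Int))) (p : Int) (seen : PySem.Set Int),
      (prrOrderPos (cs.length : Int) (PySem.List.enumerate ranking p) seen).map Prod.fst =
        prrOrder cs ranking seen := by
  intro ranking
  induction ranking with
  | nil => intro p seen; simp [PySem.List.enumerate_nil, prrOrderPos, prrOrder]
  | cons item rest ih =>
    intro p seen
    rw [PySem.List.enumerate_cons]
    simp only [prrOrderPos, prrOrder]
    cases h : prrIndex? item with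
    | none => exact ih _ seen
    | some idx =>
      dsimp only
      by_cases hok : 0 ≤ idx ∧ idx < (cs.length : Int) ∧ idx ∉ seen
      · rw [if_pos hok, if_pos hok, List.map_cons]
        rw [ih (p + 1) (seen ++ [idx]), set_add_of_not_mem hok.2.2]
      · rw [if_neg hok, if_neg hok]
        exact ih _ seen

theorem prrOrderPos_snd (n : Int) :
    ∀ (ranking : List (List (String × Int))) (p : Int) (seen : List Int),
      (∀ q ∈ prrOrderPos n (PySem.List.enumerate ranking p) seen,
          p ≤ q.2 ∧ q.2 < p + (ranking.length : Int)) ∧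
      List.Pairwise (fun a b => a.2 < b.2) (prrOrderPos n (PySem.List.enumerate ranking p) seen) := by
  intro ranking
  induction ranking with
  | nil => intro p seen; simp [PySem.List.enumerate_nil, prrOrderPos]
  | cons item rest ih =>
    intro p seen
    rw [PySem.List.enumerate_cons]
    simp only [prrOrderPos]
    cases h : prrIndex? item with
    | none =>
      obtain ⟨hb, hp⟩ := ih (p + 1) seen
      exact ⟨fun q hq => by have := hb q hq; simp; omega, hp⟩
    | some idx =>
      dsimp only
      by_cases hok : 0 ≤ idx ∧ idx < n ∧ idx ∉ seen
      · rw [if_pos hok]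
        obtain ⟨hb, hp⟩ := ih (p + 1) (seen ++ [idx])
        constructor
        · intro q hq
          rcases List.mem_cons.1 hq with hq | hq
          · subst hq; simp; try omega
          · have := hb q hq; simp; omega
        · exact List.pairwise_cons.2 ⟨fun q hq => by have := hb q hq; simp; omega, hp⟩
      · rw [if_neg hok]
        obtain ⟨hb, hp⟩ := ih (p + 1) seen
        exact ⟨fun q hq => by have := hb q hq; simp; omega, hp⟩

theorem prrOrder_props (cs : List (List (String × String))) :
    ∀ (ranking : List (List (String × Int))) (seen : PySem.Set Int),
      (prrOrder cs ranking seen).Nodup ∧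
      (∀ x ∈ prrOrder cs ranking seen, x ∉ seen ∧ 0 ≤ x ∧ x < (cs.length : Int)) := by
  intro ranking
  induction ranking with
  | nil => intro seen; simp [prrOrder]
  | cons item rest ih =>
    intro seen
    simp only [prrOrder]
    cases h : prrIndex? item with
    | none => exact ih seen
    | some idx =>
      dsimp only
      by_cases hok : 0 ≤ idx ∧ idx < (cs.length : Int) ∧ idx ∉ seen
      · rw [if_pos hok]
        obtain ⟨hn, hm⟩ := ih (PySem.Set.add seen idx)
        constructor
        · refine List.nodup_cons.2 ⟨fun hc => ?_, hn⟩
          exact (hm idx hc).1 ((PySem.Set.mem_add seen idx idx).2 (Or.inr rfl))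
        · intro x hx
          rcases List.mem_cons.1 hx with hx | hx
          · subst hx; exact ⟨hok.2.2, hok.1, hok.2.1⟩
          · obtain ⟨hns, hb⟩ := hm x hx
            exact ⟨fun hs => hns ((PySem.Set.mem_add seen idx x).2 (Or.inl hs)), hb⟩
      · rw [if_neg hok]
        exact ih seen

-- B's value, rewritten through prrOrder: the sort by priority IS the validated order
-- followed by the untouched indices in increasing order
theorem alt_eq (ranking : List (List (String × Int))) (cs : List (List (String × String))) (k : Int) :
    parse_ranking_response_alt ranking cs k =
      (((prrOrder cs ranking PySem.Set.empty ++
          (PySem.List.pyRange 0 cs.length 1).filter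
            (fun i => i ∉ PySem.Set.update PySem.Set.empty (prrOrder cs ranking PySem.Set.empty))).take
        (max k 0).toNat).map (fun i => PySem.List.pyGetD cs i [])) := by
  have hO := prrOrder_props cs ranking PySem.Set.empty
  set O := prrOrder cs ranking PySem.Set.empty with hOdef
  set d := prrB_prio (cs.length : Int) (PySem.List.enumerate ranking 0) PySem.Dict.empty with hd
  set P := prrOrderPos (cs.length : Int) (PySem.List.enumerate ranking 0) [] with hP
  have hitems : d.items = P := by
    rw [hd, prrB_prio_items]; rfl
  have hfst : P.map Prod.fst = O := prrOrderPos_fst cs ranking 0 PySem.Set.empty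
  have hkeys : d.keys = O := by
    show d.items.map (·.1) = O
    rw [hitems]; exact hfst
  have hkn : d.keys.Nodup := by rw [hkeys]; exact hO.1
  obtain ⟨hPb, hPp⟩ := prrOrderPos_snd (cs.length : Int) ranking 0 []
  rw [← hP] at hPb hPp
  set key : Int → Int := fun i => d.getD i ((ranking.length : Int) + i) with hkey
  -- lookups: ranked indices read their first position, others the default
  have hlook : ∀ q ∈ P, key q.1 = q.2 := by
    intro q hq
    have : (q.1, q.2) ∈ d.items := by rw [hitems]; exact hq
    exact PySem.Dict.getD_of_mem_items d this hkn _
  have hnolook : ∀ i : Int, i ∉ O → key i = (ranking.length : Int) + i := by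
    intro i hi
    refine PySem.Dict.getD_of_not_contains d _ ?_
    cases hc : d.contains i with
    | false => rfl
    | true => exact absurd (hkeys ▸ (PySem.Dict.contains_iff_mem_keys d i).1 hc) hi
  set R := (PySem.List.pyRange 0 cs.length 1).filter
      (fun i => i ∉ PySem.Set.update PySem.Set.empty O) with hR
  have hmemU : ∀ i : Int, i ∈ PySem.Set.update PySem.Set.empty O ↔ i ∈ O := by
    intro i
    show i ∈ PySem.Set.ofList O ↔ i ∈ O
    exact PySem.Set.mem_ofList O i
  have hrange : ∀ i : Int, i ∈ PySem.List.pyRange 0 (cs.length : Int) 1 ↔ 0 ≤ i ∧ i < (cs.length : Int) := by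
    intro i; rw [PySem.List.mem_pyRange_one]
  have hrnodup : (PySem.List.pyRange 0 (cs.length : Int) 1).Nodup := by
    rw [PySem.List.pyRange_zero_natCast]
    exact (List.nodup_range).map (fun a b => by exact_mod_cast id)
  have hrpair : List.Pairwise (· < ·) (PySem.List.pyRange 0 (cs.length : Int) 1) := by
    rw [PySem.List.pyRange_zero_natCast]
    exact List.pairwise_lt_range.map _ (fun a b h => by exact_mod_cast h)
  -- the sort equals O ++ R
  have hsorted : PySem.List.sorted (PySem.List.pyRange 0 cs.length 1) key = O ++ R := by
    apply PySem.List.sorted_eq_of_perm_of_pairwise_lt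
    · -- permutation
      have h1 : (O ++ R).Perm
          ((PySem.List.pyRange 0 cs.length 1).filter (fun i => decide (i ∈ O)) ++ R) := by
        refine List.Perm.append ?_ (List.Perm.refl R)
        rw [List.perm_ext_iff_of_nodup hO.1 (hrnodup.filter _)]
        intro a
        simp only [List.mem_filter, decide_eq_true_eq, hrange]
        constructor
        · intro ha; exact ⟨⟨(hO.2 a ha).2.1, (hO.2 a ha).2.2⟩, ha⟩
        · exact fun h => h.2
      refine h1.trans ?_
      have h2 : R = (PySem.List.pyRange 0 cs.length 1).filter (fun i => !decide (i ∈ O)) := by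
        rw [hR]
        apply List.filter_congr
        intro i _
        simp
      rw [h2]
      exact List.filter_append_perm _ _
    · -- strictly increasing keys
      rw [List.pairwise_append]
      refine ⟨?_, ?_, ?_⟩
      · rw [← hfst, List.pairwise_map]
        refine hPp.imp_of_mem ?_
        intro a b ha hb hlt
        rw [hlook a ha, hlook b hb]; exact hlt
      · have : List.Pairwise (· < ·) R := (hrpair.filter _)
        refine this.imp_of_mem ?_
        intro a b ha hb hlt
        have haO : a ∉ O := by
          have := (List.mem_filter.1 ha).2; simpa [hmemU a] using this
        have hbO : b ∉ O := by
          have := (List.mem_filter.1 hb).2; simpa [hmemU b] using this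
        rw [hnolook a haO, hnolook b hbO]; omega
      · intro a ha b hb
        have haO : a ∈ O := ha
        obtain ⟨q, hqP, hq1⟩ : ∃ q ∈ P, q.1 = a := by
          rw [← hfst] at haO
          obtain ⟨q, hq, h1⟩ := List.mem_map.1 haO
          exact ⟨q, hq, h1⟩
        have hbO : b ∉ O := by
          have := (List.mem_filter.1 hb).2; simpa [hmemU b] using this
        have hb0 : 0 ≤ b := ((hrange b).1 (List.mem_filter.1 hb).1).1
        have hkb := hnolook b hbO
        have hka : key a = q.2 := by rw [← hq1]; exact hlook q hqP
        have := hPb q hqP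
        rw [hka, hkb]; omega
  show (PySem.List.slice (PySem.List.sorted (PySem.List.pyRange 0 cs.length 1) key) none (some (max k 0))).map _ = _
  rw [hsorted, PySem.List.slice_to _ (by omega : (0:Int) ≤ max k 0)]

theorem prrA_loop1_fst (cs : List (List (String × String))) (k : Int) :
    ∀ (rest : List (List (String × Int))) (chosen : List (List (String × String)))
      (seen : PySem.Set Int), (chosen.length : Int) < k →
      (prrA_loop1 cs k rest chosen seen).1 =
        (chosen ++ (prrOrder cs rest seen).map (fun i => PySem.List.pyGetD cs i [])).take k.toNat := by
  intro rest
  induction rest with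
  | nil =>
    intro chosen seen h
    simp [prrA_loop1, prrOrder, List.take_of_length_le (by omega : chosen.length ≤ k.toNat)]
  | cons item rest ih =>
    intro chosen seen h
    simp only [prrA_loop1, prrOrder]
    cases hidx : prrIndex? item with
    | none => exact ih chosen seen h
    | some idx =>
      dsimp only
      by_cases hok : 0 ≤ idx ∧ idx < (cs.length : Int) ∧ idx ∉ seen
      · simp only [if_pos hok]
        by_cases hbrk : k ≤ (((chosen ++ [PySem.List.pyGetD cs idx []]) : List _).length : Int)
        · have hk : k.toNat = chosen.length + 1 := by simp at hbrk; omega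
          simp only [if_pos hbrk, List.map_cons, hk]
          rw [show chosen.length + 1 = (chosen ++ [PySem.List.pyGetD cs idx []]).length by simp]
          rw [show chosen ++ PySem.List.pyGetD cs idx [] ::
                (prrOrder cs rest (PySem.Set.add seen idx)).map (fun i => PySem.List.pyGetD cs i [])
              = (chosen ++ [PySem.List.pyGetD cs idx []]) ++
                (prrOrder cs rest (PySem.Set.add seen idx)).map (fun i => PySem.List.pyGetD cs i [])
              by simp]
          rw [List.take_append_of_le_length (le_refl _), List.take_length]
        · have h' : (((chosen ++ [PySem.List.pyGetD cs idx []]) : List _).length : Int) < k := by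
            simp at hbrk ⊢; omega
          simp only [if_neg hbrk]
          rw [ih _ _ h']
          simp
      · simp only [if_neg hok]
        have hbrk : ¬ k ≤ ((chosen : List _).length : Int) := by omega
        simp only [if_neg hbrk]
        exact ih chosen seen h

theorem prrA_loop1_nobreak (cs : List (List (String × String))) (k : Int) :
    ∀ (rest : List (List (String × Int))) (chosen : List (List (String × String)))
      (seen : PySem.Set Int),
      (chosen.length : Int) + ((prrOrder cs rest seen).length : Int) < k →
      prrA_loop1 cs k rest chosen seen =
        (chosen ++ (prrOrder cs rest seen).map (fun i => PySem.List.pyGetD cs i []),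
         PySem.Set.update seen (prrOrder cs rest seen)) := by
  intro rest
  induction rest with
  | nil => intro chosen seen h; simp [prrA_loop1, prrOrder, PySem.Set.update]
  | cons item rest ih =>
    intro chosen seen h
    simp only [prrA_loop1, prrOrder] at h ⊢
    cases hidx : prrIndex? item with
    | none =>
      simp only [hidx] at h ⊢
      exact ih chosen seen h
    | some idx =>
      simp only [hidx] at h ⊢
      by_cases hok : 0 ≤ idx ∧ idx < (cs.length : Int) ∧ idx ∉ seen
      · simp only [if_pos hok] at h ⊢
        have hbrk : ¬ k ≤ (((chosen ++ [PySem.List.pyGetD cs idx []]) : List _).length : Int) := by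
          simp at h ⊢; omega
        simp only [if_neg hbrk]
        rw [ih _ _ (by simp at h ⊢; omega)]
        simp [PySem.Set.update_cons]
      · simp only [if_neg hok] at h ⊢
        have hbrk : ¬ k ≤ ((chosen : List _).length : Int) := by omega
        simp only [if_neg hbrk]
        exact ih chosen seen h

theorem prrA_loop2_spec (k : Int) :
    ∀ (pairs : List (Int × List (String × String))) (chosen : List (List (String × String)))
      (seen : PySem.Set Int), (chosen.length : Int) < k →
      prrA_loop2 k pairs chosen seen =
        (chosen ++ (pairs.filter (fun p => decide (p.1 ∉ seen))).map Prod.snd).take k.toNat := by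
  intro pairs
  induction pairs with
  | nil =>
    intro chosen seen h
    simp [prrA_loop2, List.take_of_length_le (by omega : chosen.length ≤ k.toNat)]
  | cons p rest ih =>
    intro chosen seen h
    obtain ⟨i, cand⟩ := p
    simp only [prrA_loop2]
    by_cases hmem : i ∈ seen
    · simp only [if_pos hmem]
      have hbrk : ¬ k ≤ ((chosen : List _).length : Int) := by omega
      simp only [if_neg hbrk]
      rw [ih chosen seen h]
      simp [hmem]
    · simp only [if_neg hmem]
      by_cases hbrk : k ≤ (((chosen ++ [cand]) : List _).length : Int)
      · have hk : k.toNat = chosen.length + 1 := by simp at hbrk; omega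
        simp only [if_pos hbrk, hk]
        rw [List.filter_cons]
        simp only [hmem, not_false_iff, decide_true, if_true, List.map_cons]
        rw [show chosen.length + 1 = (chosen ++ [cand]).length by simp]
        rw [show chosen ++ cand :: (rest.filter (fun p => decide (p.1 ∉ seen))).map Prod.snd
              = (chosen ++ [cand]) ++ (rest.filter (fun p => decide (p.1 ∉ seen))).map Prod.snd by simp]
        rw [List.take_append_of_le_length (le_refl _), List.take_length]
      · simp only [if_neg hbrk]
        rw [ih _ seen (by simp at hbrk ⊢; omega)]
        rw [List.filter_cons]
        simp [hmem]

-- the fill phase of A is the filtered range, mapped through candidates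
theorem enumerate_filter_eq (cs : List (List (String × String))) (seen : PySem.Set Int) :
    ((PySem.List.enumerate cs 0).filter (fun p => decide (p.1 ∉ seen))).map Prod.snd =
      ((PySem.List.pyRange 0 cs.length 1).filter (fun i => i ∉ seen)).map
        (fun i => PySem.List.pyGetD cs i []) := by
  rw [PySem.List.enumerate_eq_map_pyRange cs ([] : List (String × String))]
  rw [List.filter_map, List.map_map]
  simp [Function.comp_def]

-- k ≤ 0, no in-range "index" before the loop would break: the first loop returns nothing
theorem prrA_loop1_nonpos (cs : List (List (String × String))) (k : Int) (hk : k ≤ 0) :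
    ∀ (rest : List (List (String × Int))),
      (∀ idx, rest.findSome? prrIndex? = some idx → ¬ (0 ≤ idx ∧ idx < (cs.length : Int))) →
      prrA_loop1 cs k rest [] PySem.Set.empty = ([], PySem.Set.empty) := by
  intro rest
  induction rest with
  | nil => intro _; simp [prrA_loop1]
  | cons item rest ih =>
    intro hno
    simp only [prrA_loop1]
    cases hidx : prrIndex? item with
    | none =>
      refine ih (fun idx h => hno idx ?_)
      rw [List.findSome?_cons, hidx]; exact h
    | some idx =>
      have hbad := hno idx (by rw [List.findSome?_cons, hidx])
      have hok : ¬ (0 ≤ idx ∧ idx < (cs.length : Int) ∧ idx ∉ (PySem.Set.empty : PySem.Set Int)) := by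
        rintro ⟨h1, h2, _⟩; exact hbad ⟨h1, h2⟩
      simp only [if_neg hok]
      have hbr : k ≤ ((([] : List (List (String × String))) : List _).length : Int) := by
        simp; omega
      simp only [if_pos hbr]

-- k ≤ 0, the first carried "index" is in range: the loop appends it and breaks at once
theorem prrA_loop1_hit (cs : List (List (String × String))) (k : Int) (hk : k ≤ 0) :
    ∀ (rest : List (List (String × Int))) (idx : Int),
      rest.findSome? prrIndex? = some idx → 0 ≤ idx → idx < (cs.length : Int) →
      prrA_loop1 cs k rest [] PySem.Set.empty =
        ([PySem.List.pyGetD cs idx []], PySem.Set.add PySem.Set.empty idx) := by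
  intro rest
  induction rest with
  | nil => intro idx h; simp at h
  | cons item rest ih =>
    intro idx hfs h0 h1
    rw [List.findSome?_cons] at hfs
    simp only [prrA_loop1]
    cases hidx : prrIndex? item with
    | none =>
      rw [hidx] at hfs
      exact ih idx hfs h0 h1
    | some j =>
      rw [hidx] at hfs
      have hj : j = idx := by simpa using hfs
      subst hj
      have hok : 0 ≤ j ∧ j < (cs.length : Int) ∧ j ∉ (PySem.Set.empty : PySem.Set Int) := by
        exact ⟨h0, h1, by simp [PySem.Set.empty]⟩
      simp only [if_pos hok]
      have hbr : k ≤ ((([] ++ [PySem.List.pyGetD cs j []] : List _)).length : Int) := by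
        simp; omega
      simp only [if_pos hbr]
      simp

theorem parse_ranking_response_spec : Claim_unchanged_parse_ranking_response := by
  intro ranking cs k _
  unfold Spec_parse_ranking_response
  intro hD
  by_cases hk : 0 < k
  · -- for positive k both programs return the first k of the same complete ordering
    have hmax : max k 0 = k := by omega
    by_cases hlen : ((prrOrder cs ranking PySem.Set.empty).length : Int) < k
    · -- the first loop never breaks; the fill loop completes the ordering
      have h1 := prrA_loop1_nobreak cs k ranking [] PySem.Set.empty (by simpa using hlen)
      simp only [parse_ranking_response, h1]
      have hc : ((((prrOrder cs ranking PySem.Set.empty).map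
          (fun i => PySem.List.pyGetD cs i [])).length : Int)) < k := by simpa using hlen
      rw [if_pos (by simpa using hc)]
      rw [prrA_loop2_spec k _ _ _ (by simpa using hc)]
      rw [enumerate_filter_eq]
      rw [alt_eq, hmax]
      simp [List.map_take, List.map_append]
    · -- the first loop breaks after k candidates; the fill loop is skipped
      have he : (PySem.Set.empty : PySem.Set Int) = ([] : List Int) := rfl
      have h1 := prrA_loop1_fst cs k ranking [] PySem.Set.empty (by simpa using hk)
      rw [he] at h1 hlen
      simp only [parse_ranking_response, he]
      have hklen : k.toNat ≤ (prrOrder cs ranking ([] : PySem.Set Int)).length := by omega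
      have hlen1 : (((prrA_loop1 cs k ranking [] ([] : PySem.Set Int)).1.length : Int)) = k := by
        rw [h1]; simp [List.length_take]; omega
      rw [if_neg (by omega)]
      rw [h1, alt_eq, hmax, he]
      rw [List.take_append_of_le_length hklen]
      rw [List.map_take]
      simp
  · -- k ≤ 0: B returns []; by ¬D_ the first loop collects nothing and the fill loop is skipped
    rw [not_lt] at hk
    have hmax : max k 0 = 0 := by omega
    have hB : parse_ranking_response_alt ranking cs k = [] := by
      rw [alt_eq, hmax]; simp
    rw [hB]
    unfold D_parse_ranking_response at hD
    cases hfs : ranking.findSome? (fun item => (PySem.Dict.mk item).get? "index") with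
    | none =>
      have h1 := prrA_loop1_nonpos cs k hk ranking
        (fun idx h => by rw [show ranking.findSome? prrIndex? =
            ranking.findSome? (fun item => (PySem.Dict.mk item).get? "index") from rfl, hfs] at h; cases h)
      simp only [parse_ranking_response, h1]
      rw [if_neg (by simp; omega)]
    | some idx =>
      have hni : ¬ (0 ≤ idx ∧ idx < (cs.length : Int)) := by
        intro hin
        exact hD ⟨hk, by rw [hfs]; simpa using hin⟩
      have h1 := prrA_loop1_nonpos cs k hk ranking
        (fun idx' h => by
          rw [show ranking.findSome? prrIndex? =
            ranking.findSome? (fun item => (PySem.Dict.mk item).get? "index") from rfl, hfs] at h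
          cases h; exact hni)
      simp only [parse_ranking_response, h1]
      rw [if_neg (by simp; omega)]

theorem parse_ranking_response_changed : Claim_changed_parse_ranking_response := by
  unfold Claim_changed_parse_ranking_response; decide

theorem parse_ranking_response_tight : Claim_exact_parse_ranking_response := by
  intro ranking cs k _ hD
  obtain ⟨hk, hm⟩ := hD
  cases hfs : ranking.findSome? (fun item => (PySem.Dict.mk item).get? "index") with
  | none => rw [hfs] at hm; simp at hm
  | some idx =>
    rw [hfs] at hm
    have hin : 0 ≤ idx ∧ idx < (cs.length : Int) := by simpa using hm
    have h1 := prrA_loop1_hit cs k hk ranking idx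
      (by rw [show ranking.findSome? prrIndex? =
        ranking.findSome? (fun item => (PySem.Dict.mk item).get? "index") from rfl]; exact hfs)
      hin.1 hin.2
    have hA : parse_ranking_response ranking cs k = [PySem.List.pyGetD cs idx []] := by
      simp only [parse_ranking_response, h1]
      rw [if_neg (by simp; omega)]
    have hB : parse_ranking_response_alt ranking cs k = [] := by
      rw [alt_eq, show max k 0 = 0 by omega]; simp
    rw [hA, hB]
    simp
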